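-- pv_equiv track=rewrite | github.com/plejdrup85-source/masterdata | backend/golden_source.py | get_tier_for_origin
-- ===== SOURCE A (Python) =====
-- from typing import Optional
--
-- TIER_CATALOG = 1       # Jeeves ERP / product catalog
--
-- TIER_WEBSITE = 2       # onemed.no product page
--
-- TIER_PDF = 3           # Product datasheet (internal PDF)
--
-- TIER_MANUFACTURER = 4  # Manufacturer's own website
--
-- TIER_INFERRED = 5      # URL inference, AI, heuristic
--
-- TIER_NONE = 99         # No source
--
-- def get_tier_for_origin(origin: Optional[str]) -> int:
--     """Map an origin label string to a source tier.
--
--     Handles various origin labels used throughout the codebase.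
--     """
--     if not origin:
--         return TIER_NONE
--
--     origin_lower = origin.lower().strip()
--
--     # Catalog / Jeeves
--     if any(k in origin_lower for k in ("katalog", "jeeves", "erp", "supplier")):
--         return TIER_CATALOG
--
--     # Website
--     if any(k in origin_lower for k in ("nettside", "onemed", "website", "web")):
--         return TIER_WEBSITE
--
--     # PDF / datasheet
--     if any(k in origin_lower for k in ("pdf", "datablad", "datasheet", "product_sheet")):
--         return TIER_PDF
--
--     # Manufacturer
--     if any(k in origin_lower for k in ("produsent", "manufacturer", "mfr")):
--         return TIER_MANUFACTURER
--
--     # Inferred / AI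
--     if any(k in origin_lower for k in ("utledet", "inferred", "ai", "url", "heuristic")):
--         return TIER_INFERRED
--
--     return TIER_NONE
-- ===== SOURCE B (Python) =====
-- from typing import Optional
--
-- TIER_NONE = 99         # No source
--
-- # One flat keyword -> tier table (all keywords from the five category lists).
-- _TIER_TABLE = [
--     ("katalog", 1), ("jeeves", 1), ("erp", 1), ("supplier", 1),
--     ("nettside", 2), ("onemed", 2), ("website", 2), ("web", 2),
--     ("pdf", 3), ("datablad", 3), ("datasheet", 3), ("product_sheet", 3),
--     ("produsent", 4), ("manufacturer", 4), ("mfr", 4),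
--     ("utledet", 5), ("inferred", 5), ("ai", 5), ("url", 5), ("heuristic", 5),
-- ]
--
--
-- def get_tier_for_origin(origin: Optional[str]) -> int:
--     """Map an origin label string to a source tier (table + minimum matched tier)."""
--     if not origin:
--         return TIER_NONE
--     origin_lower = origin.lower().strip()
--     return min((tier for kw, tier in _TIER_TABLE if kw in origin_lower),
--                default=TIER_NONE)
-- ===== Notes on version B (the rewrite author's own statement) =====
-- stated objective: simpler
-- what changed: Replaced the five hard-coded if/any branches by a single flat (keyword, tier) table scanned once, returning the minimum matched tier (default TIER_NONE); the minimum equals the first matching category because tiers are numbered in check order.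
import Mathlib
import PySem

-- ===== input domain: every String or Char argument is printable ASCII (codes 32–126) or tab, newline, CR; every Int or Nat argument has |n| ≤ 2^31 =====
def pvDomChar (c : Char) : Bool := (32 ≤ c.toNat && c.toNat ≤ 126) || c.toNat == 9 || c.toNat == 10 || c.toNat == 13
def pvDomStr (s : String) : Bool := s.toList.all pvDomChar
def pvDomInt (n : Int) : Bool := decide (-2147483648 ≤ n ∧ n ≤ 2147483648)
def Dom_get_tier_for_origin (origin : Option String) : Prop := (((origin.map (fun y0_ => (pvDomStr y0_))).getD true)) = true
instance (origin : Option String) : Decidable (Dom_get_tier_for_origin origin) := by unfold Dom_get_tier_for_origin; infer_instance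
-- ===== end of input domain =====

-- B replaces A's five hard-coded if/any branches by one flat (keyword, tier) table scanned
-- once, returning the minimum matched tier (objective: simpler; same cost).


-- ===== PORT A =====
def get_tier_for_origin (origin : Option String) : Int :=
  match origin with
  | none => 99
  | some s =>
    if s = "" then 99
    else
      let ol := PySem.Str.strip (PySem.Str.lower s)
      if PySem.Str.isIn "katalog" ol || PySem.Str.isIn "jeeves" ol || PySem.Str.isIn "erp" ol || PySem.Str.isIn "supplier" ol then 1
      else if PySem.Str.isIn "nettside" ol || PySem.Str.isIn "onemed" ol || PySem.Str.isIn "website" ol || PySem.Str.isIn "web" ol then 2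
      else if PySem.Str.isIn "pdf" ol || PySem.Str.isIn "datablad" ol || PySem.Str.isIn "datasheet" ol || PySem.Str.isIn "product_sheet" ol then 3
      else if PySem.Str.isIn "produsent" ol || PySem.Str.isIn "manufacturer" ol || PySem.Str.isIn "mfr" ol then 4
      else if PySem.Str.isIn "utledet" ol || PySem.Str.isIn "inferred" ol || PySem.Str.isIn "ai" ol || PySem.Str.isIn "url" ol || PySem.Str.isIn "heuristic" ol then 5
      else 99

-- ===== PORT B =====
def tierTable : List (String × Int) :=
  [("katalog", 1), ("jeeves", 1), ("erp", 1), ("supplier", 1),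
   ("nettside", 2), ("onemed", 2), ("website", 2), ("web", 2),
   ("pdf", 3), ("datablad", 3), ("datasheet", 3), ("product_sheet", 3),
   ("produsent", 4), ("manufacturer", 4), ("mfr", 4),
   ("utledet", 5), ("inferred", 5), ("ai", 5), ("url", 5), ("heuristic", 5)]

def get_tier_for_origin_alt (origin : Option String) : Int :=
  match origin with
  | none => 99
  | some s =>
    if s = "" then 99
    else
      let ol := PySem.Str.strip (PySem.Str.lower s)
      PySem.List.minD ((tierTable.filter (fun p => PySem.Str.isIn p.1 ol)).map Prod.snd) (fun x => x) 99

-- ===== PRECONDITION & SPEC =====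
def Spec_get_tier_for_origin (origin : Option String) (out : Int) : Prop := out = get_tier_for_origin_alt origin
instance (origin : Option String) (out : Int) : Decidable (Spec_get_tier_for_origin origin out) := by unfold Spec_get_tier_for_origin; infer_instance

-- ===== CLAIM (what is proved, stated in full; the proofs are below) =====
def Claim_equal_get_tier_for_origin : Prop := ∀ (origin : Option String), Dom_get_tier_for_origin origin → Spec_get_tier_for_origin origin (get_tier_for_origin origin)

-- ===== LEMMAS AND PROOFS =====

theorem minD_eq_of_min (xs : List Int) (v : Int) (hv : v ∈ xs) (hmin : ∀ y ∈ xs, v ≤ y) :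
    PySem.List.minD xs (fun x => x) 99 = v := by
  cases h : PySem.List.min? xs (fun x => x) with
  | none =>
    rw [PySem.List.min?_eq_none_iff] at h
    simp [h] at hv
  | some m =>
    have hm := PySem.List.min?_mem h
    have hle := PySem.List.min?_isMin h v hv
    simp only [PySem.List.minD, h, Option.getD_some]
    exact le_antisymm hle (hmin m hm)

set_option maxHeartbeats 1000000 in
theorem mem_matched (ol : String) (y : Int) :
    y ∈ (tierTable.filter (fun p => PySem.Str.isIn p.1 ol)).map Prod.snd ↔
      (((PySem.Str.isIn "katalog" ol || PySem.Str.isIn "jeeves" ol || PySem.Str.isIn "erp" ol || PySem.Str.isIn "supplier" ol) = true) ∧ y = 1) ∨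
      (((PySem.Str.isIn "nettside" ol || PySem.Str.isIn "onemed" ol || PySem.Str.isIn "website" ol || PySem.Str.isIn "web" ol) = true) ∧ y = 2) ∨
      (((PySem.Str.isIn "pdf" ol || PySem.Str.isIn "datablad" ol || PySem.Str.isIn "datasheet" ol || PySem.Str.isIn "product_sheet" ol) = true) ∧ y = 3) ∨
      (((PySem.Str.isIn "produsent" ol || PySem.Str.isIn "manufacturer" ol || PySem.Str.isIn "mfr" ol) = true) ∧ y = 4) ∨
      (((PySem.Str.isIn "utledet" ol || PySem.Str.isIn "inferred" ol || PySem.Str.isIn "ai" ol || PySem.Str.isIn "url" ol || PySem.Str.isIn "heuristic" ol) = true) ∧ y = 5) := by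
  simp [tierTable, List.mem_filter, List.mem_map]
  aesop

theorem key_eq (ol : String) :
    (if PySem.Str.isIn "katalog" ol || PySem.Str.isIn "jeeves" ol || PySem.Str.isIn "erp" ol || PySem.Str.isIn "supplier" ol then (1 : Int)
     else if PySem.Str.isIn "nettside" ol || PySem.Str.isIn "onemed" ol || PySem.Str.isIn "website" ol || PySem.Str.isIn "web" ol then 2
     else if PySem.Str.isIn "pdf" ol || PySem.Str.isIn "datablad" ol || PySem.Str.isIn "datasheet" ol || PySem.Str.isIn "product_sheet" ol then 3
     else if PySem.Str.isIn "produsent" ol || PySem.Str.isIn "manufacturer" ol || PySem.Str.isIn "mfr" ol then 4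
     else if PySem.Str.isIn "utledet" ol || PySem.Str.isIn "inferred" ol || PySem.Str.isIn "ai" ol || PySem.Str.isIn "url" ol || PySem.Str.isIn "heuristic" ol then 5
     else 99) =
    PySem.List.minD ((tierTable.filter (fun p => PySem.Str.isIn p.1 ol)).map Prod.snd) (fun x => x) 99 := by
  split_ifs with h1 h2 h3 h4 h5
  · refine (minD_eq_of_min _ 1 ((mem_matched ol 1).2 (Or.inl ⟨h1, rfl⟩)) ?_).symm
    intro y hy
    rcases (mem_matched ol y).1 hy with ⟨_, rfl⟩|⟨_, rfl⟩|⟨_, rfl⟩|⟨_, rfl⟩|⟨_, rfl⟩ <;> norm_num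
  · refine (minD_eq_of_min _ 2 ((mem_matched ol 2).2 (Or.inr (Or.inl ⟨h2, rfl⟩))) ?_).symm
    intro y hy
    rcases (mem_matched ol y).1 hy with ⟨hb, rfl⟩|⟨_, rfl⟩|⟨_, rfl⟩|⟨_, rfl⟩|⟨_, rfl⟩ <;>
      first | exact absurd hb h1 | norm_num
  · refine (minD_eq_of_min _ 3 ((mem_matched ol 3).2 (Or.inr (Or.inr (Or.inl ⟨h3, rfl⟩)))) ?_).symm
    intro y hy
    rcases (mem_matched ol y).1 hy with ⟨hb, rfl⟩|⟨hb, rfl⟩|⟨_, rfl⟩|⟨_, rfl⟩|⟨_, rfl⟩ <;>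
      first | exact absurd hb h1 | exact absurd hb h2 | norm_num
  · refine (minD_eq_of_min _ 4 ((mem_matched ol 4).2 (Or.inr (Or.inr (Or.inr (Or.inl ⟨h4, rfl⟩))))) ?_).symm
    intro y hy
    rcases (mem_matched ol y).1 hy with ⟨hb, rfl⟩|⟨hb, rfl⟩|⟨hb, rfl⟩|⟨_, rfl⟩|⟨_, rfl⟩ <;>
      first | exact absurd hb h1 | exact absurd hb h2 | exact absurd hb h3 | norm_num
  · refine (minD_eq_of_min _ 5 ((mem_matched ol 5).2 (Or.inr (Or.inr (Or.inr (Or.inr ⟨h5, rfl⟩))))) ?_).symm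
    intro y hy
    rcases (mem_matched ol y).1 hy with ⟨hb, rfl⟩|⟨hb, rfl⟩|⟨hb, rfl⟩|⟨hb, rfl⟩|⟨_, rfl⟩ <;>
      first | exact absurd hb h1 | exact absurd hb h2 | exact absurd hb h3 | exact absurd hb h4 | norm_num
  · have hnil : (tierTable.filter (fun p => PySem.Str.isIn p.1 ol)).map Prod.snd = [] := by
      rw [List.eq_nil_iff_forall_not_mem]
      intro y hy
      rcases (mem_matched ol y).1 hy with ⟨hb, rfl⟩|⟨hb, rfl⟩|⟨hb, rfl⟩|⟨hb, rfl⟩|⟨hb, rfl⟩ <;>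
        first | exact absurd hb h1 | exact absurd hb h2 | exact absurd hb h3 | exact absurd hb h4 | exact absurd hb h5
    rw [hnil]
    rfl

-- ===== VERDICT (by name: the statement is the Claim_ definition above) =====
theorem get_tier_for_origin_spec : Claim_equal_get_tier_for_origin := by
  intro origin _
  unfold Spec_get_tier_for_origin
  match origin with
  | none => rfl
  | some s =>
    simp only [get_tier_for_origin, get_tier_for_origin_alt]
    by_cases hs : s = ""
    · simp [hs]
    · simp only [hs, if_false]
      exact key_eq _
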